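-- pv_equiv track=rewrite | github.com/hellcatjack/VoxBridge | voxbridge/streaming/text_pool.py | dedup_segment_join
-- ===== SOURCE A (Python) =====
-- def dedup_segment_join(prev_text: str, new_text: str, min_overlap: int = 2) -> str:
--     prev = str(prev_text or "")
--     nxt = str(new_text or "")
--     if not prev:
--         return nxt
--     if not nxt:
--         return prev
--     if nxt in prev:
--         return prev
--
--     max_k = min(len(prev), len(nxt))
--     best = 0
--     for k in range(max_k, max(0, int(min_overlap) - 1), -1):
--         if prev[-k:] == nxt[:k]:
--             best = k
--             break
--     if best <= 0:
--         return f"{prev}{nxt}"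
--     return f"{prev}{nxt[best:]}"
-- ===== SOURCE B (Python) =====
-- def dedup_segment_join(prev_text, new_text, min_overlap=2):
--     prev = str(prev_text or "")
--     nxt = str(new_text or "")
--     if not prev:
--         return nxt
--     if not nxt:
--         return prev
--     if nxt in prev:
--         return prev
--     # KMP prefix function of nxt + sentinel + prev: its last value is the
--     # longest k with prev[-k:] == nxt[:k]  (sentinel '\x00' occurs in neither).
--     s = nxt + "\x00" + prev
--     pi = [0] * len(s)
--     for i in range(1, len(s)):
--         k = pi[i - 1]
--         while k > 0 and s[i] != s[k]:
--             k = pi[k - 1]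
--         if s[i] == s[k]:
--             k += 1
--         pi[i] = k
--     k0 = pi[-1]
--     lo = max(int(min_overlap), 1)
--     best = k0 if k0 >= lo else 0
--     if best <= 0:
--         return prev + nxt
--     return prev + nxt[best:]
-- ===== Notes on version B (the rewrite author's own statement) =====
-- stated objective: faster
-- what changed: Replaces the quadratic descending scan that compares prev's k-suffix with nxt's k-prefix for every k by a single KMP prefix-function pass over nxt + sentinel + prev whose last value is the longest overlap, then applies the min_overlap threshold.
import Mathlib
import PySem

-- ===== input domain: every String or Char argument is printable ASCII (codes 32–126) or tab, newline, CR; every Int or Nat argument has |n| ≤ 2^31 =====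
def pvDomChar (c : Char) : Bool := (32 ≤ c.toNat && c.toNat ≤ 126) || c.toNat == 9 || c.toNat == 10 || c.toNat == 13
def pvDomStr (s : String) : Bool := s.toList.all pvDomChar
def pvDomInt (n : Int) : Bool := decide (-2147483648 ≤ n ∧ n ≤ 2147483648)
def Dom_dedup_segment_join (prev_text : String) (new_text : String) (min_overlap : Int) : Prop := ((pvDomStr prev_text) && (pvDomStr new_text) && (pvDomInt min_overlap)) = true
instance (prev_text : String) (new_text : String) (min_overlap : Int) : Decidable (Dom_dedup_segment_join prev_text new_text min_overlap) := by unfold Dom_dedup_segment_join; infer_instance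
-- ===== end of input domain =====

-- B replaces A's quadratic descending suffix/prefix scan by a single linear KMP
-- prefix-function pass over nxt + '\x00' + prev (return value only; no mutation).

-- ===== PORT A =====
-- the for-k loop with `best`/`break`: returns the first k of the range whose
-- suffix/prefix comparison succeeds, else 0
def pvALoop (p n : List Char) : List Int → Int
  | [] => 0
  | k :: rest =>
      if PySem.List.slice p (some (-k)) none = PySem.List.slice n none (some k)
      then k else pvALoop p n rest

def dedup_segment_join (prev_text : String) (new_text : String) (min_overlap : Int) : String :=
  let prev := prev_text.toList
  let nxt := new_text.toList
  if prev = [] then String.ofList nxt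
  else if nxt = [] then String.ofList prev
  else if PySem.Chars.isIn nxt prev then String.ofList prev
  else
    let max_k : Int := min (PySem.Chars.len prev) (PySem.Chars.len nxt)
    let best : Int := pvALoop prev nxt (PySem.List.pyRange max_k (max 0 (min_overlap - 1)) (-1))
    if best ≤ 0 then String.ofList (prev ++ nxt)
    else String.ofList (prev ++ PySem.List.slice nxt (some best) none)

-- ===== PORT B =====
def pvNul : Char := Char.ofNat 0

-- the inner `while k > 0 and s[i] != s[k]: k = pi[k-1]` (fuel only makes the
-- loop structurally total; it is never exhausted)
def pvFall (s : List Char) (pi : List Nat) (c : Char) : Nat → Nat → Nat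
  | 0, k => k
  | fuel+1, k =>
      if 0 < k ∧ s.getD k pvNul ≠ c then pvFall s pi c fuel (pi.getD (k-1) 0) else k

-- prefix-function entries pi[0..i], built left to right as in Source B's for-i loop
def pvPiAux (s : List Char) : Nat → List Nat
  | 0 => [0]
  | i+1 =>
      let pi := pvPiAux s i
      let c := s.getD (i+1) pvNul
      let k := pvFall s pi c s.length (pi.getD i 0)
      pi ++ [if s.getD k pvNul = c then k + 1 else k]

def dedup_segment_join_alt (prev_text : String) (new_text : String) (min_overlap : Int) : String :=
  let prev := prev_text.toList
  let nxt := new_text.toList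
  if prev = [] then String.ofList nxt
  else if nxt = [] then String.ofList prev
  else if PySem.Chars.isIn nxt prev then String.ofList prev
  else
    let s := nxt ++ pvNul :: prev
    let pi := pvPiAux s (s.length - 1)
    let k0 : Int := (pi.getD (s.length - 1) 0 : Nat)
    let lo : Int := max min_overlap 1
    let best : Int := if k0 ≥ lo then k0 else 0
    if best ≤ 0 then String.ofList (prev ++ nxt)
    else String.ofList (prev ++ PySem.List.slice nxt (some best) none)

-- ===== PRECONDITION & SPEC =====
def Spec_dedup_segment_join (prev_text : String) (new_text : String) (min_overlap : Int) (out : String) : Prop := out = dedup_segment_join_alt prev_text new_text min_overlap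
instance (prev_text : String) (new_text : String) (min_overlap : Int) (out : String) : Decidable (Spec_dedup_segment_join prev_text new_text min_overlap out) := by unfold Spec_dedup_segment_join; infer_instance

-- ===== CLAIM (what is proved, stated in full; the proofs are below) =====
def Claim_equal_dedup_segment_join : Prop := ∀ (prev_text : String) (new_text : String) (min_overlap : Int), Dom_dedup_segment_join prev_text new_text min_overlap → Spec_dedup_segment_join prev_text new_text min_overlap (dedup_segment_join prev_text new_text min_overlap)

-- ===== LEMMAS AND PROOFS =====

-- overlap predicate: nxt's k-prefix equals prev's k-suffix
abbrev pvMatchP (p n : List Char) (k : Nat) : Prop :=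
  k ≤ min p.length n.length ∧ n.take k = p.drop (p.length - k)

-- the longest overlap
def pvOv (p n : List Char) : Nat :=
  Nat.findGreatest (fun k => pvMatchP p n k) (min p.length n.length)

-- proper border of the length-i prefix of t
abbrev pvBrP (t : List Char) (i b : Nat) : Prop :=
  b < i ∧ t.take b = (t.take i).drop (i - b)

-- longest proper border of the length-i prefix
def pvMB (t : List Char) (i : Nat) : Nat :=
  Nat.findGreatest (fun b => pvBrP t i b) (i - 1)

lemma pvMatchP_zero (p n : List Char) : pvMatchP p n 0 := by
  constructor <;> simp

lemma pvOv_spec (p n : List Char) : pvMatchP p n (pvOv p n) :=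
  Nat.findGreatest_spec (Nat.zero_le _) (pvMatchP_zero p n)

lemma pvOv_is_greatest {p n : List Char} {k : Nat} (hk : pvMatchP p n k) : k ≤ pvOv p n := by
  exact Nat.le_findGreatest hk.1 hk

lemma pvBrP_zero (t : List Char) (i : Nat) (hi : 0 < i) : pvBrP t i 0 := by
  refine ⟨hi, ?_⟩
  simp

lemma pvMB_spec (t : List Char) (i : Nat) (hi : 0 < i) : pvBrP t i (pvMB t i) :=
  Nat.findGreatest_spec (Nat.zero_le _) (pvBrP_zero t i hi)

lemma pvMB_is_greatest {t : List Char} {i b : Nat} (hb : pvBrP t i b) : b ≤ pvMB t i := by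
  exact Nat.le_findGreatest (by omega : b ≤ i - 1) hb
  -- b < i from hb.1

lemma pvMB_eq {t : List Char} {i m : Nat} (h1 : pvBrP t i m)
    (h2 : ∀ b, pvBrP t i b → b ≤ m) : pvMB t i = m := by
  exact le_antisymm (h2 _ (pvMB_spec t i (by omega))) (pvMB_is_greatest h1)

-- border extension: b+1 borders prefix (i+1) iff b borders prefix i and t[b] = t[i]
lemma pvBr_succ (t : List Char) (i b : Nat) (hiN : i < t.length) :
    pvBrP t (i+1) (b+1) ↔ pvBrP t i b ∧ t.getD b pvNul = t.getD i pvNul := by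
  have h1 : i + 1 - (b + 1) = i - b := by omega
  constructor
  · rintro ⟨hb1, hb2⟩
    have hb : b < i := by omega
    have hbl : b < t.length := by omega
    rw [h1, List.take_add_one, List.take_add_one, List.getElem?_eq_getElem hiN,
      List.getElem?_eq_getElem hbl] at hb2
    simp only [Option.toList_some] at hb2
    rw [List.drop_append] at hb2
    have hlen : (List.take i t).length = i := List.length_take_of_le (by omega)
    rw [hlen, show i - b - i = 0 from by omega, List.drop_zero] at hb2
    have := List.append_inj' hb2 (by simp)
    refine ⟨⟨hb, this.1⟩, ?_⟩
    rw [List.getD_eq_getElem t pvNul hbl, List.getD_eq_getElem t pvNul hiN]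
    simpa using this.2
  · rintro ⟨⟨hb, hb2⟩, hc⟩
    have hbl : b < t.length := by omega
    refine ⟨by omega, ?_⟩
    rw [h1, List.take_add_one, List.take_add_one, List.getElem?_eq_getElem hiN,
      List.getElem?_eq_getElem hbl]
    simp only [Option.toList_some]
    rw [List.drop_append]
    have hlen : (List.take i t).length = i := List.length_take_of_le (by omega)
    rw [hlen, show i - b - i = 0 from by omega, List.drop_zero, hb2]
    rw [List.getD_eq_getElem t pvNul hbl, List.getD_eq_getElem t pvNul hiN] at hc
    rw [hc]

-- border of a border: below a border b of prefix i, borders of prefix i and of prefix b agree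
lemma pvBr_chain {t : List Char} {i b b' : Nat} (hb : pvBrP t i b) (hlt : b' < b) :
    (pvBrP t i b' ↔ pvBrP t b b') := by
  obtain ⟨hbi, heq⟩ := hb
  have key : (t.take b).drop (b - b') = (t.take i).drop (i - b') := by
    rw [heq, List.drop_drop, show i - b + (b - b') = i - b' from by omega]
  constructor
  · rintro ⟨_, h2⟩; exact ⟨hlt, by rw [key, h2]⟩
  · rintro ⟨_, h2⟩; exact ⟨by omega, by rw [h2, key]⟩

lemma length_pvPiAux (s : List Char) (i : Nat) : (pvPiAux s i).length = i + 1 := by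
  induction i with
  | zero => rfl
  | succ i ih => simp [pvPiAux, ih]

lemma pvPiAux_getD_stable (s : List Char) (i j : Nat) (hj : j ≤ i) :
    (pvPiAux s i).getD j 0 = (pvPiAux s j).getD j 0 := by
  induction i with
  | zero => have : j = 0 := by omega
            rw [this]
  | succ i ih =>
    rcases Nat.lt_or_ge j (i+1) with h | h
    · rw [show pvPiAux s (i+1) = pvPiAux s i ++ [_] from rfl,
        List.getD_append _ _ _ _ (by rw [length_pvPiAux]; omega)]
      exact ih (by omega)
    · have : j = i + 1 := by omega
      rw [this]

-- the j-th prefix-function value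
def pvPi (s : List Char) (j : Nat) : Nat := (pvPiAux s j).getD j 0

-- the while-loop: from a maximal candidate border, pvFall descends the border chain to
-- the largest border of the (j+1)-prefix that can be extended by c = s[j+1] (or to 0)
lemma pvFall_spec (s : List Char) (j : Nat) (_hj : j + 1 < s.length)
    (IH : ∀ m, m ≤ j → pvPi s m = pvMB s (m+1)) :
    ∀ k fuel, k < fuel →
      pvBrP s (j+1) k →
      (∀ b, pvBrP s (j+1) b → s.getD b pvNul = s.getD (j+1) pvNul → b ≤ k) →
      pvBrP s (j+1) (pvFall s (pvPiAux s j) (s.getD (j+1) pvNul) fuel k) ∧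
      (∀ b, pvBrP s (j+1) b → s.getD b pvNul = s.getD (j+1) pvNul →
        b ≤ pvFall s (pvPiAux s j) (s.getD (j+1) pvNul) fuel k) ∧
      (pvFall s (pvPiAux s j) (s.getD (j+1) pvNul) fuel k = 0 ∨
        s.getD (pvFall s (pvPiAux s j) (s.getD (j+1) pvNul) fuel k) pvNul = s.getD (j+1) pvNul) := by
  intro k
  induction k using Nat.strong_induction_on with
  | _ k ihk =>
    intro fuel hfuel hbr hmax
    obtain ⟨f, rfl⟩ : ∃ f, fuel = f + 1 := ⟨fuel - 1, by omega⟩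
    by_cases hc : 0 < k ∧ s.getD k pvNul ≠ s.getD (j+1) pvNul
    · have hk1 : k - 1 ≤ j := by have := hbr.1; omega
      have hgd : (pvPiAux s j).getD (k-1) 0 = pvMB s k := by
        rw [pvPiAux_getD_stable s j (k-1) hk1]
        have h := IH (k-1) hk1
        rwa [show k - 1 + 1 = k from by omega] at h
      have hstep : pvFall s (pvPiAux s j) (s.getD (j+1) pvNul) (f+1) k
          = pvFall s (pvPiAux s j) (s.getD (j+1) pvNul) f (pvMB s k) := by
        rw [pvFall, if_pos hc, hgd]
      rw [hstep]
      have hmb := pvMB_spec s k hc.1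
      have hlt : pvMB s k < k := hmb.1
      apply ihk (pvMB s k) hlt f (by omega)
      · exact (pvBr_chain hbr hlt).mpr hmb
      · intro b hb hcb
        have hbk := hmax b hb hcb
        have hne : b ≠ k := fun h => hc.2 (h ▸ hcb)
        exact pvMB_is_greatest ((pvBr_chain hbr (by omega)).mp hb)
    · have hstep : pvFall s (pvPiAux s j) (s.getD (j+1) pvNul) (f+1) k = k := by
        rw [pvFall, if_neg hc]
      rw [hstep]
      refine ⟨hbr, hmax, ?_⟩
      by_cases h0 : k = 0
      · exact Or.inl h0
      · rcases Decidable.not_and_iff_or_not.mp hc with h | h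
        · omega
        · exact Or.inr (Decidable.not_not.mp h)

-- main KMP correctness: the j-th entry is the longest proper border of the (j+1)-prefix
lemma pvPi_correct (s : List Char) : ∀ j, j < s.length → pvPi s j = pvMB s (j+1) := by
  intro j
  induction j using Nat.strong_induction_on with
  | _ j ihj =>
    intro hj
    match j, hj with
    | 0, _ =>
      have h1 : pvMB s 1 = 0 := by
        unfold pvMB; simp
      simp [pvPi, pvPiAux, h1]
    | j+1, hj =>
      have hIH : ∀ m, m ≤ j → pvPi s m = pvMB s (m+1) := fun m hm => ihj m (by omega) (by omega)
      have hlenpi : (pvPiAux s j).length = j + 1 := length_pvPiAux s j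
      have hval : pvPi s (j+1) =
          (if s.getD (pvFall s (pvPiAux s j) (s.getD (j+1) pvNul) s.length ((pvPiAux s j).getD j 0)) pvNul
              = s.getD (j+1) pvNul
           then pvFall s (pvPiAux s j) (s.getD (j+1) pvNul) s.length ((pvPiAux s j).getD j 0) + 1
           else pvFall s (pvPiAux s j) (s.getD (j+1) pvNul) s.length ((pvPiAux s j).getD j 0)) := by
        show (pvPiAux s (j+1)).getD (j+1) 0 = _
        rw [pvPiAux, List.getD_append_right _ _ _ _ (by omega)]
        simp [hlenpi]
      have hk0 : (pvPiAux s j).getD j 0 = pvMB s (j+1) := hIH j le_rfl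
      rw [hk0] at hval
      have hmb := pvMB_spec s (j+1) (by omega)
      have hfall := pvFall_spec s j hj hIH (pvMB s (j+1)) s.length
        (by have := hmb.1; omega) hmb (fun b hb _ => pvMB_is_greatest hb)
      set r := pvFall s (pvPiAux s j) (s.getD (j+1) pvNul) s.length (pvMB s (j+1)) with hr
      obtain ⟨hrbr, hrmax, hrend⟩ := hfall
      by_cases hcr : s.getD r pvNul = s.getD (j+1) pvNul
      · rw [hval, if_pos hcr]
        refine (pvMB_eq ?_ ?_).symm
        · exact (pvBr_succ s (j+1) r hj).mpr ⟨hrbr, hcr⟩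
        · intro b hb
          match b with
          | 0 => omega
          | b0+1 =>
            obtain ⟨hb0, hc0⟩ := (pvBr_succ s (j+1) b0 hj).mp hb
            have := hrmax b0 hb0 hc0
            omega
      · rw [hval, if_neg hcr]
        have hr0 : r = 0 := by
          rcases hrend with h | h
          · exact h
          · exact absurd h hcr
        rw [hr0]
        refine (pvMB_eq (pvBrP_zero s (j+2) (by omega)) ?_).symm
        intro b hb
        match b with
        | 0 => omega
        | b0+1 =>
          obtain ⟨hb0, hc0⟩ := (pvBr_succ s (j+1) b0 hj).mp hb
          have := hrmax b0 hb0 hc0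
          rw [hr0] at this
          have hb00 : b0 = 0 := by omega
          rw [hb00] at hc0
          rw [hr0] at hcr
          exact absurd hc0 hcr

lemma pvNul_pos {p n : List Char} (hNp : pvNul ∉ p) (hNn : pvNul ∉ n) {q : Nat}
    (h : (n ++ pvNul :: p)[q]? = some pvNul) : q = n.length := by
  by_contra hne
  rcases Nat.lt_or_ge q n.length with hq | hq
  · rw [List.getElem?_append_left hq] at h
    exact hNn (List.mem_of_getElem? h)
  · rw [List.getElem?_append_right hq] at h
    rw [show q - n.length = (q - n.length - 1) + 1 from by omega, List.getElem?_cons_succ] at h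
    exact hNp (List.mem_of_getElem? h)

lemma pvBr_idx {t : List Char} {b m x : Nat} (h : t.take b = t.drop m) (hx : x < b) :
    t[x]? = t[m+x]? := by
  have h' := congrArg (fun l => l[x]?) h
  simpa [List.getElem?_take, hx, List.getElem?_drop] using h'

-- the overall border of nxt ++ NUL :: prev is exactly an overlap, when NUL occurs in neither
lemma pvBr_sep (p n : List Char) (hNp : pvNul ∉ p) (hNn : pvNul ∉ n) (b : Nat) :
    pvBrP (n ++ pvNul :: p) (n ++ pvNul :: p).length b ↔ (b < (n ++ pvNul :: p).length ∧ pvMatchP p n b) := by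
  have hN : (n ++ pvNul :: p).length = n.length + 1 + p.length := by
    simp only [List.length_append, List.length_cons]; omega
  have hsome : (n ++ pvNul :: p)[n.length]? = some pvNul := by
    rw [List.getElem?_append_right le_rfl, Nat.sub_self, List.getElem?_cons_zero]
  have hsplit : ∀ b ≤ n.length, b ≤ p.length →
      ((n ++ pvNul :: p).take b = n.take b ∧
        (n ++ pvNul :: p).drop ((n ++ pvNul :: p).length - b) = p.drop (p.length - b)) := by
    intro b hbM hbL
    constructor
    · rw [List.take_append_of_le_length hbM]
    · rw [List.drop_append, List.drop_eq_nil_of_le (by omega), List.nil_append,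
        show (n ++ pvNul :: p).length - b - n.length = (p.length - b) + 1 from by omega,
        List.drop_succ_cons]
  constructor
  · rintro ⟨hb, heq⟩
    rw [List.take_length] at heq
    have hbM : b ≤ n.length := by
      by_contra hgt
      have h3 := pvBr_idx heq (show n.length < b from by omega)
      rw [hsome] at h3
      have h4 := pvNul_pos hNp hNn h3.symm
      omega
    have hbL : b ≤ p.length := by
      by_contra hgt
      have hx : b - p.length - 1 < b := by omega
      have h3 := pvBr_idx heq hx
      rw [show (n ++ pvNul :: p).length - b + (b - p.length - 1) = n.length from by omega,
        hsome] at h3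
      have h4 := pvNul_pos hNp hNn h3
      omega
    obtain ⟨h4, h5⟩ := hsplit b hbM hbL
    rw [h4, h5] at heq
    exact ⟨hb, ⟨by omega, heq⟩⟩
  · rintro ⟨hb, hble, hmatch⟩
    obtain ⟨h4, h5⟩ := hsplit b (by omega) (by omega)
    refine ⟨hb, ?_⟩
    rw [List.take_length, h4, h5]
    exact hmatch

lemma pvMB_eq_pvOv (p n : List Char) (hNp : pvNul ∉ p) (hNn : pvNul ∉ n) :
    pvMB (n ++ pvNul :: p) (n ++ pvNul :: p).length = pvOv p n := by
  have hlen : 0 < (n ++ pvNul :: p).length := by simp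
  apply le_antisymm
  · have h := pvMB_spec (n ++ pvNul :: p) _ hlen
    exact pvOv_is_greatest ((pvBr_sep p n hNp hNn _).mp h).2
  · apply pvMB_is_greatest
    have h := pvOv_spec p n
    refine (pvBr_sep p n hNp hNn _).mpr ⟨?_, h⟩
    have := h.1
    simp only [List.length_append, List.length_cons]
    omega

-- A's loop returns the longest overlap when it clears the threshold, else 0
lemma pvOv_le (p n : List Char) : pvOv p n ≤ min p.length n.length :=
  Nat.findGreatest_le _

lemma pvALoop_aux (p n : List Char) (lo : Int) (hlo : 1 ≤ lo) :
    ∀ (d : Nat), ∀ (a : Int), a = lo - 1 + d → a ≤ min p.length n.length →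
      (∀ k : Nat, a < (k : Int) → ¬ pvMatchP p n k) →
      pvALoop p n (PySem.List.pyRange a (lo-1) (-1))
        = if (lo ≤ (pvOv p n : Int) ∧ (pvOv p n : Int) ≤ a) then (pvOv p n : Int) else 0 := by
  intro d
  induction d with
  | zero =>
    intro a ha _ _
    rw [PySem.List.pyRange_neg_one_eq_nil (by omega), if_neg (by omega)]
    rfl
  | succ d ihd =>
    intro a ha hle hinv
    rw [PySem.List.pyRange_neg_one_cons (by omega)]
    set k : Nat := a.toNat with hk
    have hak : a = (k : Int) := by omega
    have hkpos : 0 < k := by omega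
    have htest : (PySem.List.slice p (some (-a)) none = PySem.List.slice n none (some a))
        ↔ (n.take k = p.drop (p.length - k)) := by
      rw [hak, PySem.List.slice_from_neg_natCast p k hkpos, PySem.List.slice_to_natCast]
      exact eq_comm
    by_cases hmatch : n.take k = p.drop (p.length - k)
    · have hm : pvMatchP p n k := ⟨by omega, hmatch⟩
      rw [pvALoop, if_pos (htest.mpr hmatch)]
      have h1 : k ≤ pvOv p n := pvOv_is_greatest hm
      have h2 : (pvOv p n : Int) ≤ a := by
        by_contra h
        exact hinv (pvOv p n) (by omega) (pvOv_spec p n)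
      rw [if_pos ⟨by omega, h2⟩]
      omega
    · rw [pvALoop, if_neg (fun h => hmatch (htest.mp h))]
      have hovne : (pvOv p n : Int) ≠ a := by
        intro h
        apply hmatch
        have hok : pvOv p n = k := by omega
        exact (hok ▸ (pvOv_spec p n)).2
      have hinv' : ∀ k' : Nat, a - 1 < (k' : Int) → ¬ pvMatchP p n k' := by
        intro k' hk' hm'
        rcases lt_or_ge a (k' : Int) with h | h
        · exact hinv k' h hm'
        · have : k' = k := by omega
          exact hmatch (this ▸ hm').2
      rw [ihd (a-1) (by omega) (by omega) hinv']
      by_cases hc : lo ≤ (pvOv p n : Int) ∧ (pvOv p n : Int) ≤ a - 1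
      · rw [if_pos hc, if_pos ⟨hc.1, by omega⟩]
      · rw [if_neg hc, if_neg (fun h => hc ⟨h.1, by omega⟩)]

lemma pvALoop_eq (p n : List Char) (lo : Int) (hlo : 1 ≤ lo) :
    pvALoop p n (PySem.List.pyRange (min (PySem.Chars.len p) (PySem.Chars.len n)) (lo - 1) (-1))
      = if ((pvOv p n : Int) ≥ lo) then (pvOv p n : Int) else 0 := by
  have hlen : min (PySem.Chars.len p) (PySem.Chars.len n) = ((min p.length n.length : Nat) : Int) := by
    simp [PySem.Chars.len_eq]
  have hovle := pvOv_le p n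
  rcases le_or_gt (min (PySem.Chars.len p) (PySem.Chars.len n)) (lo - 1) with h | h
  · rw [PySem.List.pyRange_neg_one_eq_nil h]
    rw [hlen] at h
    rw [if_neg (by omega)]
    rfl
  · rw [hlen] at h ⊢
    rw [pvALoop_aux p n lo hlo (((min p.length n.length : Nat) : Int) - (lo-1)).toNat _
      (by omega) (by omega) (fun k hk hm => by have := hm.1; omega)]
    have : ((pvOv p n : Int) ≤ ((min p.length n.length : Nat) : Int)) := by omega
    by_cases hc : lo ≤ (pvOv p n : Int)
    · rw [if_pos ⟨hc, this⟩, if_pos hc]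
    · rw [if_neg (fun hh => hc hh.1), if_neg hc]

-- ===== VERDICT (by name: the statement is the Claim_ definition above) =====
lemma pvNul_not_mem {s : String} (h : pvDomStr s = true) : pvNul ∉ s.toList := by
  intro hm
  have h2 := List.all_eq_true.mp h _ hm
  have h3 : pvDomChar pvNul = false := by decide
  rw [h3] at h2
  exact Bool.false_ne_true h2

-- the two cores compute the same `best`
lemma pvBest_eq (p n : List Char) (mo : Int) (hNp : pvNul ∉ p) (hNn : pvNul ∉ n) :
    pvALoop p n (PySem.List.pyRange (min (PySem.Chars.len p) (PySem.Chars.len n)) (max 0 (mo - 1)) (-1))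
      = (if ((pvPiAux (n ++ pvNul :: p) ((n ++ pvNul :: p).length - 1)).getD ((n ++ pvNul :: p).length - 1) 0 : Int) ≥ max mo 1
          then ((pvPiAux (n ++ pvNul :: p) ((n ++ pvNul :: p).length - 1)).getD ((n ++ pvNul :: p).length - 1) 0 : Int) else 0) := by
  set t := n ++ pvNul :: p with ht
  have hN : 0 < t.length := by simp [ht]
  have hk0 : (pvPiAux t (t.length - 1)).getD (t.length - 1) 0 = pvOv p n := by
    have h1 : pvPi t (t.length - 1) = pvMB t ((t.length - 1) + 1) :=
      pvPi_correct t (t.length - 1) (by omega)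
    rw [show t.length - 1 + 1 = t.length from by omega] at h1
    rw [show (pvPiAux t (t.length - 1)).getD (t.length - 1) 0 = pvPi t (t.length - 1) from rfl,
      h1, ht, pvMB_eq_pvOv p n hNp hNn]
  rw [hk0, show max 0 (mo - 1) = (max mo 1) - 1 from by omega,
    pvALoop_eq p n (max mo 1) (by omega)]

theorem dedup_segment_join_spec : Claim_equal_dedup_segment_join := by
  intro prev_text new_text mo hdom
  unfold Spec_dedup_segment_join dedup_segment_join dedup_segment_join_alt
  have hdom' : pvDomStr prev_text = true ∧ pvDomStr new_text = true := by
    unfold Dom_dedup_segment_join at hdom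
    simp only [Bool.and_eq_true] at hdom
    exact ⟨hdom.1.1, hdom.1.2⟩
  by_cases h1 : prev_text.toList = []
  · simp [h1]
  · rw [if_neg h1, if_neg h1]
    by_cases h2 : new_text.toList = []
    · rw [if_pos h2, if_pos h2]
    · rw [if_neg h2, if_neg h2]
      by_cases h3 : PySem.Chars.isIn new_text.toList prev_text.toList = true
      · rw [if_pos h3, if_pos h3]
      · rw [if_neg h3, if_neg h3]
        dsimp only
        rw [pvBest_eq prev_text.toList new_text.toList mo
          (pvNul_not_mem hdom'.1) (pvNul_not_mem hdom'.2)]
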